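/- GENERATED by mk_final_copies.py from the proof of the farm's unit `start_decoder.F5b` (farm:start_decoder.F5b.1: Proof.lean) as the
   re-elaboration sweep compiled it — do not edit. -/
import Asan.CheckWalk
import Vorbis.Spec.Reader
import Vorbis.Spec.Units.start_decoder_F5b

open X86 X86.User Asan Vorbis Vorbis.Spec Vorbis.Spec.StartDecoder

set_option maxRecDepth 4000
set_option maxHeartbeats 4000000

namespace Vorbis.Spec.start_decoder_F5b

/-- **Segment F5b of `start_decoder`** (`cut216` 0x1155d4 … `cut217` 0x1155f8, C lines 4002 – 4003): `lea r12d,[rax+1]`, the checked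
byte store `floor1_multiplier = r12b` (`[rbx+634H]`: `In5.site`), `call get_bits(f, 4)`. Exit: `In5` at `cut217` (`In5.keep` with the
element window `[G+634H, G+635H)`), FL7 (the stored byte read back through get_bits' footprint), and the result below 16. -/
theorem f5b_walk {Lay : Layout} (hLay : Lay.hi = 0x1000000) {μ : Microarch} (hμ : UserX.MicroOK μ) {u₀ : State}
    (hcode : HasCodeNat Lay u₀ Vorbis.L.start_decoder.entry Vorbis.Code.code_start_decoder.nat Vorbis.L.start_decoder.size)
    (h_gb : ∀ (others : List Obj) (frames : List (Nat × FrameLayout)) (Blk : Block → Prop) (len : Nat),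
      Calls Lay μ Vorbis.WayInv (Vorbis.conv u₀) Vorbis.L.get_bits.entry (Vorbis.Spec.get_bits.spec others frames Blk len))
    (hst1 : Asan.SmallCheck Lay μ Vorbis.WayInv (Vorbis.CodeOK u₀) [.rax, .rdx] 1 Vorbis.L.__asan_store1_noabort.entry)
    {g : Ghost} {i : Nat} {A5 : Arena} {A : Arena × List Obj} {mc : Int} {n : Nat} {v : State}
    (hat : AtF5b u₀ g i A5 A mc n v) :
    ReachVia Lay μ WayInv v (fun w => AtF5c u₀ g i A5 A mc n w) := by
  have hb := hat.in5
  have hf := hb.loop.frame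
  have he := hf.entry
  v_entry he
  have hgb := h_gb A.2 g.frames' (g.Blk A) g.len
  obtain ⟨r8, rlo, rhi, ra, flo, fhi, fstack, farena, flog, fc1, fc64, ilt, gdef, blo, bhi, btext, bstack, bdata, blog⟩ := hb.geo
  obtain ⟨z, hzlt, c_rax⟩ : ∃ z, z < 4 ∧ v.reg .rax = UInt64.ofNat z := ⟨_, hat.rax, (UInt64.ofNat_toNat).symm⟩
  have hsite := hb.site 0x634 1 (by omega) (by simp only [voff]; omega)
  -- the three addresses as numbers (the walker sees `UInt64.ofNat R`, not `addr g.R`)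
  obtain ⟨R, hR⟩ : ∃ R, R = g.R := ⟨_, rfl⟩
  obtain ⟨f, hfe⟩ : ∃ f, f = g.f := ⟨_, rfl⟩
  obtain ⟨gi, hgi⟩ : ∃ gi, gi = floorAt g v.mem i := ⟨_, rfl⟩
  have c_rip := hf.rip
  have c_rsp := hf.rsp
  have c_rbp := hb.loop.rbp
  have c_rbx := hb.rbx
  rw [← hR] at c_rsp r8 rlo rhi ra fstack
  rw [← hfe] at c_rbp flo fhi fstack farena flog
  rw [← hgi] at c_rbx gdef hsite
  simp only [addr] at c_rsp c_rbp c_rbx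
  have c_eq : Mem.EqOn Vorbis.L.textLo Vorbis.L.textHi u₀.mem v.mem := hf.code
  have hdf : v.flags .df = false := (show abiInv _ from hf.inv).1
  have hmx : v.mxcsr &&& 0x1F80 = 0x1F80 := (show abiInv _ from hf.inv).2
  have hsse := Vorbis.sseOK_of_abiInv hf.inv
  have hgw : 0x119d40 ≤ gi ∧ gi + 1596 ≤ 0xC00000 ∧ (gi + 1596 ≤ 0x700000 ∨ 0x800000 ≤ gi) := by
    omega
  -- the element is apart from `*f` (`*f` is outside the arena)
  have hgf : gi + 1596 ≤ f ∨ f + 1808 ≤ gi := by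
    omega
  clear fc1 fc64 ilt gdef blo bhi btext bstack bdata blog
  have hbv : (BitVec.setWidth 8 (BitVec.setWidth 32 (UInt64.ofNat z + 1).toBitVec)).toNat = z + 1 := by
    have e1 : (UInt64.ofNat z + 1).toNat = z + 1 := by u_omega
    simp only [BitVec.toNat_setWidth, UInt64.toNat_toBitVec, e1]
    omega
  u_walk hcode [hμ.vendor, hbv] until [Vorbis.L.start_decoder.cut217] span [Vorbis.L.textLo, Vorbis.L.textHi] side (v_side)
  case check_1155df =>
    -- the byte `floor1_multiplier` of the element
    have hun : ShadowUntouched v.mem s_1155df.mem := by v_untouched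
    exact Vorbis.Spec.check_site hf.shadow hun hsite (by u_omega)
  case call_inv => v_inv
  case pre_1155f3 =>
    have hun : ShadowUntouched v.mem s_1155f3.mem := by v_untouched
    have hrdi : (s_1155f3.reg .rdi).toNat = g.f := by
      rw [w_rdi, ← hfe]
      exact toNat_addr f (by omega)
    have hs0 : Mem.SameExcept [⟨R - 408, R⟩, ⟨gi + 0x634, gi + 0x635⟩] v.mem s_1155f3.mem := by
      u_same
    have hq : ∀ w, w ∈ ([⟨R - 408, R⟩, ⟨gi + 0x634, gi + 0x635⟩] : List Span) →
        Floor.Quiet g (floorAt g v.mem i) 0x634 0x635 w := by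
      intro w hw
      simp only [List.mem_cons, List.mem_nil_iff, or_false] at hw
      unfold Floor.Quiet
      rw [← hR, ← hfe, ← hgi]
      rcases hw with rfl | rfl
      all_goals simp only []
      all_goals omega
    refine ⟨Floor.reader_pre hb.loop ?_ hun hrdi (Floor.bits_quiet hb.geo hb.loop.mid.bits hs0 hq (by omega)), ?_⟩
    · rw [w_rsp, ← hR]
      u_omega
    · rw [bitsArg_def, w_rsi]
      decide
  · -- after the return of get_bits(f, 4): the cut point 0x1155f8
    have hrdi : (s_1155f3.reg .rdi).toNat = f := by
      rw [w_rdi_1155f3]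
      exact toNat_addr f (by omega)
    obtain ⟨hpu, hpb⟩ := w_post
    rw [hrdi] at hpb
    v_after_call w_rsp_1155f3 w_mem_1155f3
    simp only [w_rdi_1155f3] at w_same
    have hun0 : ShadowUntouched v.mem s_1155f3.mem := by
      rw [w_mem_1155f3]
      v_untouched
    have hun : ShadowUntouched v.mem s_1155f3r.mem := Mem.EqOn.trans hun0 hpu
    -- the stored byte, read back through get_bits' footprint
    have hp1 : s_1155f3.mem.readLE (UInt64.ofNat gi + 1588) 1 = z + 1 := by
      have t1 : (UInt64.ofNat R - 8).toNat = R - 8 := by u_omega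
      have t2 : (UInt64.ofNat gi + 1588).toNat = gi + 1588 := by u_omega
      rw [w_mem_1155f3, Mem.readLE_writeLE_disjoint_noWrap _ _ 8 _ _ 1 (by unfold Mem.NoWrap; omega) (by unfold Mem.NoWrap; omega)
        (by omega), Mem.readLE_writeLE_same _ _ 1 _ (by decide)]
      omega
    rw [w_mem_1155f3] at hp1
    have hbyte : s_1155f3r.mem.readLE (UInt64.ofNat gi + 1588) 1 = z + 1 := by
      obtain ⟨g1, g2, g3⟩ := hgw
      rcases g3 with g3 | g3
      · rcases hgf with g4 | g4
        · u_frame hp1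
        · u_frame hp1
      · rcases hgf with g4 | g4
        · u_frame hp1
        · u_frame hp1
    have hsame : Mem.SameExcept [⟨R - 408, R⟩, ⟨f + 48, f + 56⟩, ⟨f + 84, f + 96⟩, ⟨f + 136, f + 144⟩,
        ⟨f + 1484, f + 1749⟩, ⟨f + 1752, f + 1784⟩, ⟨gi + 0x634, gi + 0x635⟩] v.mem s_1155f3r.mem := by
      u_same
    have earg : bitsArg s_1155f3 = 4 := by
      rw [bitsArg_def, w_rsi_1155f3]
      rfl
    have hws : ∀ w, w ∈ ([⟨R - 408, R⟩, ⟨f + 48, f + 56⟩, ⟨f + 84, f + 96⟩, ⟨f + 136, f + 144⟩,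
        ⟨f + 1484, f + 1749⟩, ⟨f + 1752, f + 1784⟩, ⟨gi + 0x634, gi + 0x635⟩] : List Span) →
        Floor.Win g (floorAt g v.mem i) 0x634 0x635 w := by
      intro w hw
      simp only [List.mem_cons, List.mem_nil_iff, or_false] at hw
      unfold Floor.Win
      rw [← hR, ← hfe, ← hgi]
      rcases hw with rfl | rfl | rfl | rfl | rfl | rfl | rfl
      all_goals simp only []
      all_goals omega
    have e1 : s_1155f3r.reg .rsp = addr g.R := by
      rw [w_rsp, hR]
      rfl
    have e2 : s_1155f3r.reg .rbp = addr g.f := by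
      rw [w_kept .rbp rfl, c_rbp, hfe]
      rfl
    have e3 : s_1155f3r.reg .rbx = addr (floorAt g v.mem i) := by
      rw [w_kept .rbx rfl, c_rbx, hgi]
      rfl
    have hbits' : Bits (g.Blk A) g.len s_1155f3r.mem g.f := by
      rw [← hfe]
      exact hpb.bits
    have hin := hb.keep w_rip e1 e2 e3 w_inv w_eq hsame hws (by omega) (by omega) (by omega) hun hbits'
    obtain ⟨eG, _, _, _⟩ := Floor.fields_same hb.geo hsame hws (by omega)
    have hmul : Floor1.floor1_multiplier s_1155f3r.mem (floorAt g s_1155f3r.mem i) = z + 1 := by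
      rw [eG, ← hgi]
      simp only [vacc, voff]
      have ea : addr (gi + 1588) = UInt64.ofNat gi + 1588 := by
        apply UInt64.toNat_inj.mp
        rw [toNat_addr _ (by omega)]
        u_omega
      unfold Mem.u8
      rw [ea]
      exact hbyte
    refine ReachVia.done ⟨hin, ?_, ?_⟩
    · rw [hmul]
      omega
    · have h2 := hpb.result.2 (by rw [earg]; decide)
      rw [earg] at h2
      exact h2

end Vorbis.Spec.start_decoder_F5b

/-- Unit `start_decoder.F5b`: `f5b_walk` at every entry state. -/
theorem Vorbis.Spec.Worked.start_decoder_F5b_ok : Vorbis.Spec.start_decoder_F5b.Statement := by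
  intro Lay hLay μ hμ u₀ hcode h_gb hst1 g i A5 A mc n v hat
  exact Vorbis.Spec.start_decoder_F5b.f5b_walk hLay hμ hcode h_gb hst1 hat
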